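-- pv_equiv track=rewrite | github.com/erichschroeter/ijw2pmtg | scryfall/api.py | unsanitize_card_name
-- ===== SOURCE A (Python) =====
-- def unsanitize_card_name(filename: str) -> str:
--     """Convert a sanitized filename back to the original card name."""
--     # Restore special sequences
--     replacements = {
--         "__LT__": "<",
--         "__GT__": ">",
--         "__COLON__": ":",
--         "__QUOTE__": '"',
--         "__SLASH__": "/",
--         "__BSLASH__": "\\",
--         "__PIPE__": "|",
--         "__QUEST__": "?",
--         "__STAR__": "*",
--     }
--
--     unsanitized = filename
--     for replacement, char in replacements.items():
--         unsanitized = unsanitized.replace(replacement, char)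
--     return unsanitized
-- ===== SOURCE B (Python) =====
-- REPLACEMENTS = {
--     "__LT__": "<",
--     "__GT__": ">",
--     "__COLON__": ":",
--     "__QUOTE__": '"',
--     "__SLASH__": "/",
--     "__BSLASH__": "\\",
--     "__PIPE__": "|",
--     "__QUEST__": "?",
--     "__STAR__": "*",
-- }
--
--
-- def unsanitize_card_name(filename: str) -> str:
--     """Convert a sanitized filename back to the original card name.
--
--     Single left-to-right scan: at each position, emit the replacement for the
--     escape token starting there (if any) and skip it, else copy the character.
--     """
--     out = []
--     i = 0
--     n = len(filename)
--     while i < n: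
--         for token, char in REPLACEMENTS.items():
--             if filename.startswith(token, i):
--                 out.append(char)
--                 i += len(token)
--                 break
--         else:
--             out.append(filename[i])
--             i += 1
--     return "".join(out)
-- ===== Notes on version B (the rewrite author's own statement) =====
-- stated objective: alternative
-- what changed: Replaces nine sequential whole-string str.replace passes with one left-to-right scan that consults the token table at each position and emits the output in a single pass.
-- outside the precondition, e.g. on unsanitize_card_name('__GT__LT__'): A returns '__GT<', B returns '>LT__'
import Mathlib
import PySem

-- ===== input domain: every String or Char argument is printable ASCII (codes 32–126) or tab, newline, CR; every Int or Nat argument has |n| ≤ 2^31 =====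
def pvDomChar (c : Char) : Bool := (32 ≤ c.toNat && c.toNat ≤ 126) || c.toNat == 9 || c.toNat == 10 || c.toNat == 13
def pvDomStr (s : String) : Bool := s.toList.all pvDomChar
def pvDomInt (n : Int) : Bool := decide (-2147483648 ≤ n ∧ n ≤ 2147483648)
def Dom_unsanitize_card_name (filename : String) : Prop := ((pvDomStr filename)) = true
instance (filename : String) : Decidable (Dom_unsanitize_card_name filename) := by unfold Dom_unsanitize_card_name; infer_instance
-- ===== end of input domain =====

-- B replaces A's nine sequential whole-string str.replace passes by a single left-to-right
-- scan that consults the escape-token table at each position (objective: alternative algorithm).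

-- ===== PORT A =====
-- replacements dict (distinct literal keys, insertion order) as its .items() list
def pvReplacementsA : List (String × String) :=
  [("__LT__", "<"), ("__GT__", ">"), ("__COLON__", ":"), ("__QUOTE__", "\""),
   ("__SLASH__", "/"), ("__BSLASH__", "\\"), ("__PIPE__", "|"), ("__QUEST__", "?"),
   ("__STAR__", "*")]

def unsanitize_card_name (filename : String) : String :=
  pvReplacementsA.foldl (fun unsanitized pr => PySem.Str.replace unsanitized pr.1 pr.2) filename

-- ===== PORT B =====
-- REPLACEMENTS.items() of Source B, on code points (each value is a single character)
def pvPairsB : List (List Char × Char) :=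
  [("__LT__".toList, '<'), ("__GT__".toList, '>'), ("__COLON__".toList, ':'),
   ("__QUOTE__".toList, '"'), ("__SLASH__".toList, '/'), ("__BSLASH__".toList, '\\'),
   ("__PIPE__".toList, '|'), ("__QUEST__".toList, '?'), ("__STAR__".toList, '*')]

-- the inner for/break of Source B: first table entry whose token starts at the current position
def pvFindTok (s : List Char) : Option (List Char × Char) :=
  pvPairsB.find? (fun pr => pr.1.isPrefixOf s)

-- termination helper for the scan: a found token is nonempty
lemma pvFindTok_pos {s : List Char} {pr : List Char × Char} (h : pvFindTok s = some pr) :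
    0 < pr.1.length := by
  have hmem : pr ∈ pvPairsB := List.mem_of_find?_eq_some h
  have : ∀ q ∈ pvPairsB, 0 < q.1.length := by decide
  exact this pr hmem

-- the while loop of Source B: emit the replacement and skip the token, else copy one character
def pvScan : List Char → List Char
  | [] => []
  | c :: t =>
    match _h : pvFindTok (c :: t) with
    | some pr => pr.2 :: pvScan ((c :: t).drop pr.1.length)
    | none => c :: pvScan t
termination_by s => s.length
decreasing_by
  · simp only [List.length_drop, List.length_cons]
    have := pvFindTok_pos _h
    omega
  · simp

def unsanitize_card_name_alt (filename : String) : String :=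
  String.ofList (pvScan filename.toList)

-- ===== PRECONDITION & SPEC =====
-- Pre_ excludes filenames in which occurrences of two DISTINCT escape tokens overlap
-- (they can only share their '__' delimiters, e.g. "__GT__LT__"): the sanitizer never
-- produces such strings and the decoded value there is an accident of A's pass order.
def Pre_unsanitize_card_name (filename : String) : Prop :=
  ∀ p < filename.toList.length, ∀ q < filename.toList.length,
    ∀ pr1 ∈ pvPairsB, ∀ pr2 ∈ pvPairsB,
      pr1.1 <+: filename.toList.drop p → pr2.1 <+: filename.toList.drop q →
        p ≤ q → q < p + pr1.1.length → pr1.1 = pr2.1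
instance (filename : String) : Decidable (Pre_unsanitize_card_name filename) := by
  unfold Pre_unsanitize_card_name; exact Nat.decidableBallLT _ _

def pvWitness_unsanitize_card_name : String := "Fire __SLASH__ Ice __QUEST__"

def Spec_unsanitize_card_name (filename : String) (out : String) : Prop :=
  out = unsanitize_card_name_alt filename
instance (filename : String) (out : String) : Decidable (Spec_unsanitize_card_name filename out) := by
  unfold Spec_unsanitize_card_name; infer_instance

-- ===== CLAIM (what is proved, stated in full; the proofs are below) =====
def Claim_equal_unsanitize_card_name : Prop :=
  ∀ (filename : String), Dom_unsanitize_card_name filename →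
    Pre_unsanitize_card_name filename →
      Spec_unsanitize_card_name filename (unsanitize_card_name filename)

-- ===== LEMMAS AND PROOFS =====

-- the cascade of A on code points
def pvStep (s : List Char) (pr : List Char × Char) : List Char :=
  PySem.Chars.replace s pr.1 [pr.2]

def pvCasc (s : List Char) : List Char := pvPairsB.foldl pvStep s

-- a character produced by a replacement
abbrev pvSpecial (c : Char) : Prop := c ∈ pvPairsB.map Prod.snd

-- s' agrees with s on any prefix of s' that shows no replacement character
def PvAgree (s' s : List Char) : Prop :=
  ∀ k : Nat, (∀ c ∈ s'.take k, ¬ pvSpecial c) → s'.take k = s.take k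

-- no-overlap condition (the content of Pre_ without the index bounds)
def PvNoOv (s : List Char) : Prop :=
  ∀ (p q : Nat), ∀ pr1 ∈ pvPairsB, ∀ pr2 ∈ pvPairsB,
    pr1.1 <+: s.drop p → pr2.1 <+: s.drop q → p ≤ q → q < p + pr1.1.length → pr1.1 = pr2.1

-- table facts, by computation
lemma pv_tok_ne_nil : ∀ pr ∈ pvPairsB, pr.1 ≠ [] := by decide

lemma pv_tok_no_special_bool :
    (pvPairsB.all fun pr => pr.1.all fun c => !((pvPairsB.map Prod.snd).contains c)) = true := by
  decide

lemma pv_tok_no_special : ∀ pr ∈ pvPairsB, ∀ c ∈ pr.1, ¬ pvSpecial c := by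
  intro pr hpr c hc
  have h1 := List.all_eq_true.mp pv_tok_no_special_bool pr hpr
  have h2 := List.all_eq_true.mp h1 c hc
  simp only [Bool.not_eq_eq_eq_not, Bool.not_true, List.contains_eq_mem,
    decide_eq_false_iff_not] at h2
  simpa [eq_comm] using h2

lemma pv_prefix_incomp : ∀ pr1 ∈ pvPairsB, ∀ pr2 ∈ pvPairsB, pr1.1 <+: pr2.1 → pr1.1 = pr2.1 := by
  decide

-- ---- PySem.Chars.replace unfolding lemmas (accumulator/fuel elimination) ----
lemma pv_go_acc (old new : List Char) (fuel : Nat) : ∀ (l acc : List Char),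
    PySem.Chars.replace.go old new fuel l acc =
      acc.reverse ++ PySem.Chars.replace.go old new fuel l [] := by
  induction fuel with
  | zero => intro l acc; rw [PySem.Chars.replace.go.eq_1, PySem.Chars.replace.go.eq_1]; simp
  | succ f ih =>
    intro l acc
    cases l with
    | nil =>
      rw [PySem.Chars.replace.go.eq_2 _ _ _ _ (by omega),
        PySem.Chars.replace.go.eq_2 _ _ _ _ (by omega)]
      simp
    | cons c t =>
      rw [PySem.Chars.replace.go.eq_3, PySem.Chars.replace.go.eq_3]
      split
      · rw [ih _ (new.reverse ++ acc), ih _ (new.reverse ++ [])]; simp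
      · rw [ih _ (c :: acc), ih _ [c]]; simp

lemma pv_go_fuel (old new : List Char) (hold : old ≠ []) :
    ∀ (n : Nat) (l : List Char), l.length ≤ n →
      ∀ (fuel fuel' : Nat) (acc : List Char), l.length ≤ fuel → l.length ≤ fuel' →
        PySem.Chars.replace.go old new fuel l acc = PySem.Chars.replace.go old new fuel' l acc := by
  have h1 : 1 ≤ old.length := List.length_pos_of_ne_nil hold
  intro n
  induction n with
  | zero =>
    intro l hl fuel fuel' acc _ _
    have : l = [] := List.eq_nil_of_length_eq_zero (by omega)
    subst this
    cases fuel with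
    | zero => cases fuel' with
      | zero => rfl
      | succ f' =>
        rw [PySem.Chars.replace.go.eq_1, PySem.Chars.replace.go.eq_2 _ _ _ _ (by omega)]; simp
    | succ f => cases fuel' with
      | zero =>
        rw [PySem.Chars.replace.go.eq_1, PySem.Chars.replace.go.eq_2 _ _ _ _ (by omega)]; simp
      | succ f' =>
        rw [PySem.Chars.replace.go.eq_2 _ _ _ _ (by omega),
          PySem.Chars.replace.go.eq_2 _ _ _ _ (by omega)]
  | succ n ih =>
    intro l hl fuel fuel' acc hf hf'
    cases l with
    | nil => exact ih [] (by simp) fuel fuel' acc (by simp) (by simp)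
    | cons c t =>
      simp only [List.length_cons] at hl hf hf'
      cases fuel with
      | zero => omega
      | succ f => cases fuel' with
        | zero => omega
        | succ f' =>
          rw [PySem.Chars.replace.go.eq_3, PySem.Chars.replace.go.eq_3]
          split
          · have hlen : (List.drop old.length (c :: t)).length ≤ n := by
              simp only [List.length_drop, List.length_cons]; omega
            exact ih _ hlen f f' _ (by simp only [List.length_drop, List.length_cons]; omega)
              (by simp only [List.length_drop, List.length_cons]; omega)
          · exact ih t (by omega) f f' _ (by omega) (by omega)

lemma pv_repl_nil (old new : List Char) (hold : old ≠ []) :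
    PySem.Chars.replace [] old new = [] := by
  have hni : ¬ (old.isEmpty = true) := by simp [List.isEmpty_iff, hold]
  rw [PySem.Chars.replace.eq_def, if_neg hni]
  rw [show ([] : List Char).length = 0 from rfl, PySem.Chars.replace.go.eq_1]; rfl

lemma pv_repl_cons_nomatch (old new : List Char) (hold : old ≠ []) (c : Char) (t : List Char)
    (h : ¬ old <+: (c :: t)) :
    PySem.Chars.replace (c :: t) old new = c :: PySem.Chars.replace t old new := by
  have hni : ¬ (old.isEmpty = true) := by simp [List.isEmpty_iff, hold]
  rw [PySem.Chars.replace.eq_def, if_neg hni, PySem.Chars.replace.eq_def, if_neg hni]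
  have hb : old.isPrefixOf (c :: t) = false := by
    rw [Bool.eq_false_iff]; intro hh; exact h (List.isPrefixOf_iff_prefix.mp hh)
  rw [show (c :: t).length = t.length + 1 from rfl, PySem.Chars.replace.go.eq_3, hb]
  simp only [Bool.false_eq_true, if_false]
  rw [pv_go_acc]
  rfl

lemma pv_repl_match (old new : List Char) (hold : old ≠ []) (s : List Char) (h : old <+: s) :
    PySem.Chars.replace s old new = new ++ PySem.Chars.replace (s.drop old.length) old new := by
  have h1 : 1 ≤ old.length := List.length_pos_of_ne_nil hold
  have hs : s ≠ [] := by intro hh; subst hh; exact hold (List.prefix_nil.mp h)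
  obtain ⟨c, t, rfl⟩ := List.exists_cons_of_ne_nil hs
  have hni : ¬ (old.isEmpty = true) := by simp [List.isEmpty_iff, hold]
  have hb : old.isPrefixOf (c :: t) = true := List.isPrefixOf_iff_prefix.mpr h
  rw [PySem.Chars.replace.eq_def, if_neg hni, PySem.Chars.replace.eq_def, if_neg hni]
  rw [show (c :: t).length = t.length + 1 from rfl, PySem.Chars.replace.go.eq_3, if_pos hb]
  rw [pv_go_acc]
  simp only [List.reverse_reverse, List.append_nil]
  congr 1
  have hplen : old.length ≤ t.length + 1 := by simpa using h.length_le
  exact pv_go_fuel old new hold (List.drop old.length (c :: t)).length _ le_rfl t.length _ []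
    (by simp only [List.length_drop, List.length_cons]; omega) le_rfl

-- replace commutes with an occurrence-free prefix
lemma pv_repl_append (old new : List Char) (hold : old ≠ []) :
    ∀ (a s : List Char), (∀ p, p < a.length → ¬ old <+: (a ++ s).drop p) →
      PySem.Chars.replace (a ++ s) old new = a ++ PySem.Chars.replace s old new := by
  intro a
  induction a with
  | nil => intro s _; rfl
  | cons ch a' ih =>
    intro s h
    have h0 : ¬ old <+: (ch :: (a' ++ s)) := by
      have := h 0 (by simp)
      simpa using this
    rw [List.cons_append, pv_repl_cons_nomatch old new hold _ _ h0,
      ih s (fun p hp => h (p + 1) (by simp; omega))]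
    rfl

-- ---- PvAgree machinery ----
lemma pvAgree_refl (s : List Char) : PvAgree s s := fun _ _ => rfl

lemma pvAgree_trans {s'' s' s : List Char} (h1 : PvAgree s'' s') (h2 : PvAgree s' s) :
    PvAgree s'' s := by
  intro k hk
  have e1 := h1 k hk
  have e2 := h2 k (by rw [← e1]; exact hk)
  rw [e1, e2]

lemma pvAgree_append {s' s : List Char} (a : List Char) (hag : PvAgree s' s) :
    PvAgree (a ++ s') (a ++ s) := by
  intro k hk
  rw [List.take_append, List.take_append]
  congr 1
  apply hag
  intro c hc
  exact hk c (by rw [List.take_append]; exact List.mem_append_right _ hc)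

lemma pvAgree_cons {s' s : List Char} (ch : Char) (hag : PvAgree s' s) :
    PvAgree (ch :: s') (ch :: s) := pvAgree_append [ch] hag

lemma pvAgree_replace {pr : List Char × Char} (hmem : pr ∈ pvPairsB) :
    ∀ (n : Nat) (s : List Char), s.length ≤ n → PvAgree (pvStep s pr) s := by
  have hne : pr.1 ≠ [] := pv_tok_ne_nil pr hmem
  intro n
  induction n with
  | zero =>
    intro s hs
    have : s = [] := List.eq_nil_of_length_eq_zero (by omega)
    subst this
    rw [pvStep, pv_repl_nil _ _ hne]
    exact pvAgree_refl []
  | succ n ih =>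
    intro s hs
    cases s with
    | nil => rw [pvStep, pv_repl_nil _ _ hne]; exact pvAgree_refl []
    | cons ch t =>
      by_cases hp : pr.1 <+: (ch :: t)
      · rw [pvStep, pv_repl_match _ _ hne _ hp]
        intro k hk
        cases k with
        | zero => rfl
        | succ k =>
          exfalso
          apply hk pr.2 _ (List.mem_map.mpr ⟨pr, hmem, rfl⟩)
          simp [List.take_succ_cons]
      · rw [pvStep, pv_repl_cons_nomatch _ _ hne _ _ hp]
        exact pvAgree_cons ch (ih t (by simpa using Nat.lt_succ_iff.mp (by simpa using hs)))

-- a token occurrence in s' transfers to s when it is not preceded by a replacement character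
lemma pvTransfer {s' s : List Char} (hag : PvAgree s' s) {pr : List Char × Char}
    (hmem : pr ∈ pvPairsB) {p : Nat} (hpre : ∀ c ∈ s'.take p, ¬ pvSpecial c)
    (hocc : pr.1 <+: s'.drop p) : pr.1 <+: s.drop p := by
  have htake : (s'.drop p).take pr.1.length = pr.1 := by
    obtain ⟨w, hw⟩ := hocc
    rw [← hw, List.take_left]
  have hnos : ∀ c ∈ s'.take (p + pr.1.length), ¬ pvSpecial c := by
    intro c hc
    rw [List.take_add] at hc
    rcases List.mem_append.mp hc with h | h
    · exact hpre c h
    · rw [htake] at h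
      exact pv_tok_no_special pr hmem c h
  have heq := hag (p + pr.1.length) hnos
  have : (s.drop p).take pr.1.length = pr.1 := by
    have e1 : (s.take (p + pr.1.length)).drop p = (s.drop p).take pr.1.length := by
      rw [List.drop_take]; congr 1; omega
    have e2 : (s'.take (p + pr.1.length)).drop p = (s'.drop p).take pr.1.length := by
      rw [List.drop_take]; congr 1; omega
    rw [← e1, ← heq, e2, htake]
  rw [← this]
  exact List.take_prefix _ _

-- ---- overlap-freedom carries to suffixes ----
lemma pvNoOv_drop {s : List Char} (h : PvNoOv s) (n : Nat) : PvNoOv (s.drop n) := by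
  intro p q pr1 h1 pr2 h2 o1 o2 hpq hlt
  rw [List.drop_drop] at o1 o2
  exact h (n + p) (n + q) pr1 h1 pr2 h2 o1 o2 (by omega) (by omega)

-- ---- fold commutation lemmas ----
-- every pass commutes past an emitted replacement character
lemma pvFold_special_cons {c : Char} (hc : pvSpecial c) :
    ∀ (ps : List (List Char × Char)), (∀ pr ∈ ps, pr ∈ pvPairsB) → ∀ (x : List Char),
      ps.foldl pvStep (c :: x) = c :: ps.foldl pvStep x := by
  intro ps
  induction ps with
  | nil => intro _ x; rfl
  | cons pr ps ih =>
    intro hps x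
    have hmem : pr ∈ pvPairsB := hps pr (List.mem_cons_self)
    have hne : pr.1 ≠ [] := pv_tok_ne_nil pr hmem
    have hnp : ¬ pr.1 <+: (c :: x) := by
      intro hp
      obtain ⟨d, t, he⟩ := List.exists_cons_of_ne_nil hne
      have hd : d = c := by
        obtain ⟨w, hw⟩ := hp
        rw [he] at hw
        exact (List.cons_eq_cons.mp (by simpa using hw)).1
      exact pv_tok_no_special pr hmem c (by rw [he, hd]; exact List.mem_cons_self) hc
    have hstep : pvStep (c :: x) pr = c :: pvStep x pr := by
      rw [pvStep, pvStep, pv_repl_cons_nomatch _ _ hne _ _ hnp]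
    rw [List.foldl_cons, List.foldl_cons, hstep,
      ih (fun q hq => hps q (List.mem_cons_of_mem _ hq))]

-- when no token starts at the head, every pass keeps the head character
lemma pvFold_cons_nomatch {ch : Char} {r : List Char}
    (hnm : ∀ pr ∈ pvPairsB, ¬ pr.1 <+: (ch :: r)) :
    ∀ (ps : List (List Char × Char)), (∀ pr ∈ ps, pr ∈ pvPairsB) →
      ∀ (s' : List Char), PvAgree s' r →
        ps.foldl pvStep (ch :: s') = ch :: ps.foldl pvStep s' ∧ PvAgree (ps.foldl pvStep s') r := by
  intro ps
  induction ps with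
  | nil => intro _ s' hag; exact ⟨rfl, hag⟩
  | cons pr ps ih =>
    intro hps s' hag
    have hmem : pr ∈ pvPairsB := hps pr (List.mem_cons_self)
    have hne : pr.1 ≠ [] := pv_tok_ne_nil pr hmem
    have hnp : ¬ pr.1 <+: (ch :: s') := by
      intro hp
      have htr := pvTransfer (pvAgree_cons ch hag) hmem (p := 0) (by simp) (by simpa using hp)
      exact hnm pr hmem (by simpa using htr)
    have hag' : PvAgree (pvStep s' pr) r :=
      pvAgree_trans (pvAgree_replace hmem s'.length s' le_rfl) hag
    rw [List.foldl_cons, List.foldl_cons]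
    rw [show pvStep (ch :: s') pr = ch :: pvStep s' pr from by
      rw [pvStep, pvStep, pv_repl_cons_nomatch _ _ hne _ _ hnp]]
    exact ih (fun q hq => hps q (List.mem_cons_of_mem _ hq)) (pvStep s' pr) hag'

-- passes for other tokens keep an initial token occurrence intact
lemma pvFold_tok {tokpr : List Char × Char} {r : List Char} (htok : tokpr ∈ pvPairsB)
    (hno : PvNoOv (tokpr.1 ++ r)) :
    ∀ (ps : List (List Char × Char)), (∀ pr ∈ ps, pr ∈ pvPairsB) →
      (∀ pr ∈ ps, pr.1 ≠ tokpr.1) → ∀ (s' : List Char), PvAgree s' r →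
        ps.foldl pvStep (tokpr.1 ++ s') = tokpr.1 ++ ps.foldl pvStep s' ∧
          PvAgree (ps.foldl pvStep s') r := by
  intro ps
  induction ps with
  | nil => intro _ _ s' hag; exact ⟨rfl, hag⟩
  | cons pr ps ih =>
    intro hps hne s' hag
    have hmem : pr ∈ pvPairsB := hps pr (List.mem_cons_self)
    have hprne : pr.1 ≠ [] := pv_tok_ne_nil pr hmem
    have htokne : tokpr.1 ≠ [] := pv_tok_ne_nil tokpr htok
    have hag2 : PvAgree (tokpr.1 ++ s') (tokpr.1 ++ r) := pvAgree_append tokpr.1 hag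
    -- no occurrence of pr.1 starts inside the initial token
    have hnp : ∀ p, p < tokpr.1.length → ¬ pr.1 <+: (tokpr.1 ++ s').drop p := by
      intro p hp hocc
      have hpre : ∀ c ∈ (tokpr.1 ++ s').take p, ¬ pvSpecial c := by
        intro c hc
        rw [List.take_append] at hc
        rcases List.mem_append.mp hc with h | h
        · exact pv_tok_no_special tokpr htok c (List.take_subset _ _ h)
        · rw [show p - tokpr.1.length = 0 from by omega] at h
          simp at h
      have hocc' : pr.1 <+: (tokpr.1 ++ r).drop p := pvTransfer hag2 hmem hpre hocc
      cases p with
      | zero =>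
        have h1 : pr.1 <+: (tokpr.1 ++ r) := by simpa using hocc'
        have h2 : tokpr.1 <+: (tokpr.1 ++ r) := List.prefix_append _ _
        rcases List.prefix_or_prefix_of_prefix h1 h2 with h | h
        · exact hne pr List.mem_cons_self (pv_prefix_incomp pr hmem tokpr htok h)
        · exact hne pr List.mem_cons_self (pv_prefix_incomp tokpr htok pr hmem h).symm
      | succ p' =>
        have := hno 0 (p' + 1) tokpr htok pr hmem (by simp)
          hocc' (by omega) (by simp; omega)
        exact hne pr List.mem_cons_self this.symm
    have hstep : pvStep (tokpr.1 ++ s') pr = tokpr.1 ++ pvStep s' pr := by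
      rw [pvStep, pvStep]
      exact pv_repl_append pr.1 [pr.2] hprne tokpr.1 s' hnp
    have hag' : PvAgree (pvStep s' pr) r :=
      pvAgree_trans (pvAgree_replace hmem s'.length s' le_rfl) hag
    rw [List.foldl_cons, List.foldl_cons, hstep]
    exact ih (fun q hq => hps q (List.mem_cons_of_mem _ hq))
      (fun q hq => hne q (List.mem_cons_of_mem _ hq)) (pvStep s' pr) hag'

-- scan unfolding
lemma pvScan_nil : pvScan [] = [] := by rw [pvScan]

lemma pvScan_cons_some {c : Char} {t : List Char} {pr : List Char × Char}
    (h : pvFindTok (c :: t) = some pr) :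
    pvScan (c :: t) = pr.2 :: pvScan ((c :: t).drop pr.1.length) := by
  rw [pvScan]
  split
  · rename_i pr' h'
    rw [h'] at h
    cases h
    rfl
  · rename_i h'
    rw [h'] at h
    cases h

lemma pvScan_cons_none {c : Char} {t : List Char} (h : pvFindTok (c :: t) = none) :
    pvScan (c :: t) = c :: pvScan t := by
  rw [pvScan]
  split
  · rename_i pr' h'
    rw [h'] at h
    cases h
  · rfl

-- ---- main equivalence on code points ----
lemma pvMain : ∀ (n : Nat) (s : List Char), s.length ≤ n → PvNoOv s → pvCasc s = pvScan s := by
  intro n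
  induction n with
  | zero =>
    intro s hs _
    have : s = [] := List.eq_nil_of_length_eq_zero (by omega)
    subst this
    rw [pvScan_nil]
    decide
  | succ n ih =>
    intro s hs hno
    cases s with
    | nil => rw [pvScan_nil]; decide
    | cons ch t =>
      cases hf : pvFindTok (ch :: t) with
      | none =>
        have hnm : ∀ pr ∈ pvPairsB, ¬ pr.1 <+: (ch :: t) := by
          intro pr hmem hp
          have := List.find?_eq_none.mp hf pr hmem
          simp [List.isPrefixOf_iff_prefix] at this
          exact this hp
        have hmain := pvFold_cons_nomatch hnm pvPairsB (fun _ hq => hq) t (pvAgree_refl t)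
        have ht : pvCasc t = pvScan t :=
          ih t (by simpa using Nat.lt_succ_iff.mp (by simpa using hs))
            (by simpa using pvNoOv_drop hno 1)
        rw [pvScan_cons_none hf, pvCasc, hmain.1, ← pvCasc, ht]
      | some pr =>
        obtain ⟨hpred, l1, l2, hsplit, hl1⟩ := List.find?_eq_some_iff_append.mp hf
        have hmem : pr ∈ pvPairsB := List.mem_of_find?_eq_some hf
        have htokne : pr.1 ≠ [] := pv_tok_ne_nil pr hmem
        have htokpos : 0 < pr.1.length := List.length_pos_of_ne_nil htokne
        have hp : pr.1 <+: (ch :: t) := List.isPrefixOf_iff_prefix.mp hpred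
        obtain ⟨r, hr⟩ := hp
        have hl1ne : ∀ q ∈ l1, q.1 ≠ pr.1 := by
          intro q hq he
          have := hl1 q hq
          rw [Bool.not_eq_eq_eq_not, Bool.not_true] at this
          rw [he] at this
          rw [hpred] at this
          cases this
        have hl1mem : ∀ q ∈ l1, q ∈ pvPairsB := by
          intro q hq; rw [hsplit]; exact List.mem_append_left _ hq
        have hl2mem : ∀ q ∈ l2, q ∈ pvPairsB := by
          intro q hq; rw [hsplit]
          exact List.mem_append_right _ (List.mem_cons_of_mem _ hq)
        have hnor : PvNoOv (pr.1 ++ r) := by rw [hr]; exact hno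
        -- the passes before pr keep the initial token
        have hpre := pvFold_tok hmem hnor l1 hl1mem hl1ne r (pvAgree_refl r)
        -- the pr pass replaces it
        have hmid : pvStep (pr.1 ++ l1.foldl pvStep r) pr =
            pr.2 :: pvStep (l1.foldl pvStep r) pr := by
          rw [pvStep, pv_repl_match _ _ htokne _ (List.prefix_append _ _), List.drop_left]
          rfl
        -- the passes after pr commute past the replacement character
        have hpost := pvFold_special_cons (List.mem_map.mpr ⟨pr, hmem, rfl⟩) l2 hl2mem
          (pvStep (l1.foldl pvStep r) pr)
        have hr' : r = (ch :: t).drop pr.1.length := by rw [← hr, List.drop_left]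
        have hrlen : r.length ≤ n := by
          have : (ch :: t).length ≤ n + 1 := hs
          rw [← hr] at this
          simp at this
          omega
        have hnorr : PvNoOv r := by rw [hr']; exact pvNoOv_drop hno _
        have htail : pvCasc r = pvScan r := ih r hrlen hnorr
        calc pvCasc (ch :: t)
            = (l1 ++ pr :: l2).foldl pvStep (pr.1 ++ r) := by rw [pvCasc, hsplit, hr]
          _ = (pr :: l2).foldl pvStep (l1.foldl pvStep (pr.1 ++ r)) := by
              rw [List.foldl_append]
          _ = l2.foldl pvStep (pvStep (pr.1 ++ l1.foldl pvStep r) pr) := by rw [hpre.1]; rfl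
          _ = l2.foldl pvStep (pr.2 :: pvStep (l1.foldl pvStep r) pr) := by rw [hmid]
          _ = pr.2 :: l2.foldl pvStep (pvStep (l1.foldl pvStep r) pr) := hpost
          _ = pr.2 :: (l1 ++ pr :: l2).foldl pvStep r := by rw [List.foldl_append]; rfl
          _ = pr.2 :: pvCasc r := by rw [pvCasc, hsplit]
          _ = pr.2 :: pvScan r := by rw [htail]
          _ = pvScan (ch :: t) := by rw [pvScan_cons_some hf, ← hr']

-- ---- bridges to the String-level ports ----
lemma pv_toList_A (f : String) : (unsanitize_card_name f).toList = pvCasc f.toList := by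
  simp only [unsanitize_card_name, pvReplacementsA, pvCasc, pvPairsB, pvStep,
    List.foldl_cons, List.foldl_nil, PySem.Str.toList_replace]
  rfl

lemma pv_toList_B (f : String) : (unsanitize_card_name_alt f).toList = pvScan f.toList := by
  rw [unsanitize_card_name_alt, String.toList_ofList]

lemma pv_pre_noov {f : String} (h : Pre_unsanitize_card_name f) : PvNoOv f.toList := by
  intro p q pr1 h1 pr2 h2 o1 o2 hpq hlt
  have hp : p < f.toList.length := by
    by_contra hc
    have : f.toList.drop p = [] := List.drop_eq_nil_of_le (by omega)
    rw [this] at o1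
    exact pv_tok_ne_nil pr1 h1 (List.prefix_nil.mp o1)
  have hq : q < f.toList.length := by
    by_contra hc
    have : f.toList.drop q = [] := List.drop_eq_nil_of_le (by omega)
    rw [this] at o2
    exact pv_tok_ne_nil pr2 h2 (List.prefix_nil.mp o2)
  exact h p hp q hq pr1 h1 pr2 h2 o1 o2 hpq hlt

-- ===== VERDICT (by name: the statement is the Claim_ definition above) =====
theorem unsanitize_card_name_spec : Claim_equal_unsanitize_card_name := by
  intro f _hdom hpre
  unfold Spec_unsanitize_card_name
  have h1 : (unsanitize_card_name f).toList = (unsanitize_card_name_alt f).toList := by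
    rw [pv_toList_A, pv_toList_B]
    exact pvMain f.toList.length f.toList le_rfl (pv_pre_noov hpre)
  have h2 := congrArg String.ofList h1
  rwa [String.ofList_toList, String.ofList_toList] at h2
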